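-- pv_equiv track=rewrite | github.com/cutehammond772/problem-solving-archive | 백준/Gold/1450. 냅색문제/냅색문제.py | solve
-- ===== SOURCE A (Python) =====
-- def combinations(A, C):
-- 	L = len(A)
-- 	result = []
--
-- 	for bit in range(1 << L):
-- 		total = 0
--
-- 		for i in range(L):
-- 			if bit & 1 << i:
-- 				total += A[i]
--
-- 		if total <= C:
-- 			result.append(total)
--
-- 	return result
--
-- def upper_bound(A, K):
-- 	x, y = 0, len(A)
--
-- 	while x < y:
-- 		mid  = (x + y) >> 1
--
-- 		if A[mid] > K:
-- 			y = mid
-- 		else: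
-- 			x = mid + 1
--
-- 	return x
--
-- def solve(N, C, A):
-- 	if N == 1:
-- 		return 2 if A[0] <= C else 1
--
-- 	P, Q = combinations(A[:(N // 2)], C), combinations(A[(N // 2):], C)
--
-- 	# 한 쪽만 정렬한다.
-- 	Q.sort()
-- 	result = 0
--
-- 	for amount in P:
-- 		result += upper_bound(Q, C - amount)
--
-- 	return result
-- ===== SOURCE B (Python) =====
-- def solve(N, C, A):
--     if N == 1:
--         return 2 if A[0] <= C else 1
--
--     def subset_sums(xs):
--         # all 2 ** len(xs) subset sums; bit i of the list index <-> xs[i]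
--         if not xs:
--             return [0]
--         rest = subset_sums(xs[1:])
--         out = []
--         for s in rest:
--             out.append(s)
--             out.append(s + xs[0])
--         return out
--
--     P = sorted(s for s in subset_sums(A[:N // 2]) if s <= C)
--     Q = sorted(s for s in subset_sums(A[N // 2:]) if s <= C)
--
--     result = 0
--     j = len(Q)
--     for p in P:  # p ascending, so the threshold C - p descends and j only moves left
--         while j > 0 and Q[j - 1] > C - p:
--             j -= 1
--         result += j
--     return result
-- ===== Notes on version B (the rewrite author's own statement) =====
-- stated objective: faster
-- what changed: Half-sums are generated incrementally (each subset sum extends a previously generated one in O(1) instead of re-summing the L set bits of every mask), both halves are sorted and the per-element binary search is replaced by a single amortized two-pointer sweep.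
import Mathlib
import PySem

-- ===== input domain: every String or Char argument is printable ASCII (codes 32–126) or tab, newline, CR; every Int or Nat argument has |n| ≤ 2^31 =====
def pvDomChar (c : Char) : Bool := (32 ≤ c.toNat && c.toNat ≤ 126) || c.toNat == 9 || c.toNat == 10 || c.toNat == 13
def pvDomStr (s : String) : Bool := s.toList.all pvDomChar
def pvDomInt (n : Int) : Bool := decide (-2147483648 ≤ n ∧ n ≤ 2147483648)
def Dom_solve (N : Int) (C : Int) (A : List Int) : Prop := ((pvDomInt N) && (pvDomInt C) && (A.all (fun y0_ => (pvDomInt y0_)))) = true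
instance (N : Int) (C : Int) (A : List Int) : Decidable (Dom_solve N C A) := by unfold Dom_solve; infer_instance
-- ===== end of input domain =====

-- B generates each half's subset sums incrementally (no per-mask bit loop) and replaces the
-- per-element binary search by one amortized two-pointer sweep over both sorted halves.

-- ===== PORT A =====
-- inner loop of `combinations`: `for i in range(L): if bit & 1 << i: total += A[i]`;
-- bit and i are nonnegative, so `1 << i` is `<<<` on ℤ, and 0 ≤ i < L = len A keeps
-- `A[i]` in range (pyGetD's default is never used).
def pvInnerTotal (A : List Int) (bit : Int) : Int :=
  (PySem.List.pyRange 0 (A.length : Int) 1).foldl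
    (fun total i =>
      if PySem.Int.band bit ((1 : Int) <<< (i.toNat : Int)) ≠ 0 then
        total + PySem.List.pyGetD A i 0
      else total) 0

-- `combinations(A, C)`: for bit in range(1 << L): total = …; if total <= C: result.append(total)
def pvCombinations (A : List Int) (C : Int) : List Int :=
  (PySem.List.pyRange 0 ((1 : Int) <<< (A.length : Int)) 1).foldl
    (fun result bit =>
      let total := pvInnerTotal A bit
      if total ≤ C then result ++ [total] else result) []

-- `upper_bound`'s while loop; `(x + y) >> 1` is `>>> 1`; whenever 0 ≤ x < y ≤ len A the
-- index mid is in range (pyGetD's default is never used on such calls).  The loop shrinks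
-- y - x on every iteration, so fuel = len A (its initial value of y - x) makes the
-- structural recursion compute exactly the Python while loop.
def pvUbLoop (A : List Int) (K : Int) : Nat → Int → Int → Int
  | 0, x, _ => x
  | fuel + 1, x, y =>
    if x < y then
      let mid := (x + y) >>> (1 : Nat)
      if PySem.List.pyGetD A mid 0 > K then pvUbLoop A K fuel x mid
      else pvUbLoop A K fuel (mid + 1) y
    else x

def solve (N : Int) (C : Int) (A : List Int) : Int :=
  if N = 1 then
    -- `A[0]` raises IndexError on an empty list: excluded by Pre_solve
    match PySem.List.pyGet? A 0 with
    | some a0 => if a0 ≤ C then 2 else 1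
    | none => 0
  else
    let P := pvCombinations (PySem.List.slice A none (some (PySem.Int.floordiv N 2))) C
    let Q := pvCombinations (PySem.List.slice A (some (PySem.Int.floordiv N 2)) none) C
    let Qs := PySem.List.sorted Q (fun q => q) false
    P.foldl (fun result amount => result + pvUbLoop Qs (C - amount) Qs.length 0 (Qs.length : Int)) 0

-- ===== PORT B =====
-- subset_sums: all 2^len subset sums built incrementally (bit i of the index <-> xs[i])
def pvSubsetSums : List Int → List Int
  | [] => [0]
  | x :: xs => (pvSubsetSums xs).flatMap (fun s => [s, s + x])

-- inner while: `while j > 0 and Q[j - 1] > K: j -= 1` (j stays within [0, len Q]; ported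
-- on Nat, so `Q[j - 1]` for j = jj + 1 is `Q[jj]`, always in range when j ≤ len Q)
def pvDropPtr (Q : List Int) (K : Int) : Nat → Nat
  | 0 => 0
  | jj + 1 => if PySem.List.pyGetD Q (jj : Int) 0 > K then pvDropPtr Q K jj else jj + 1

-- `sorted(s for s in subset_sums(xs) if s <= C)`
def pvHalfSums (C : Int) (xs : List Int) : List Int :=
  PySem.List.sorted ((pvSubsetSums xs).filter (fun s => s ≤ C)) (fun s => s) false

def solve_alt (N : Int) (C : Int) (A : List Int) : Int :=
  if N = 1 then
    match PySem.List.pyGet? A 0 with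
    | some a0 => if a0 ≤ C then 2 else 1
    | none => 0
  else
    let P := pvHalfSums C (PySem.List.slice A none (some (PySem.Int.floordiv N 2)))
    let Q := pvHalfSums C (PySem.List.slice A (some (PySem.Int.floordiv N 2)) none)
    (P.foldl (fun st p =>
        let j := pvDropPtr Q (C - p) st.2
        (st.1 + (j : Int), j)) ((0 : Int), Q.length)).1

-- ===== PRECONDITION & SPEC =====
-- Pre_ excludes only N = 1 with an empty list, where `A[0]` raises IndexError.
def Pre_solve (N : Int) (C : Int) (A : List Int) : Prop := N = 1 → A ≠ []
instance (N : Int) (C : Int) (A : List Int) : Decidable (Pre_solve N C A) := by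
  unfold Pre_solve; infer_instance
def pvWitness_solve : Int × Int × List Int := (4, 7, [2, 3, 5, 4])

def Spec_solve (N : Int) (C : Int) (A : List Int) (out : Int) : Prop := out = solve_alt N C A
instance (N : Int) (C : Int) (A : List Int) (out : Int) : Decidable (Spec_solve N C A out) := by
  unfold Spec_solve; infer_instance

-- ===== CLAIM (what is proved, stated in full; the proofs are below) =====
def Claim_equal_solve : Prop := ∀ (N : Int) (C : Int) (A : List Int), Dom_solve N C A → Pre_solve N C A → Spec_solve N C A (solve N C A)

-- ===== LEMMAS AND PROOFS =====

-- the sum of the elements of A selected by the bits of the mask m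
def pvMaskSum : List Int → Nat → Int
  | [], _ => 0
  | x :: xs, m => (if m % 2 = 1 then x else 0) + pvMaskSum xs (m / 2)

theorem pvSum_testBit (A : List Int) (m : Nat) :
    ((List.range A.length).map (fun k => if m.testBit k then A.getD k 0 else 0)).sum
      = pvMaskSum A m := by
  induction A generalizing m with
  | nil => rfl
  | cons x A ih =>
    rw [List.length_cons, List.range_succ_eq_map, List.map_cons, List.map_map, List.sum_cons]
    rw [pvMaskSum]
    congr 1
    · simp [Nat.testBit_zero]
    · rw [← ih (m / 2)]
      congr 1
      apply List.map_congr_left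
      intro k _
      simp [Function.comp, Nat.testBit_add_one]

theorem pvInnerTotal_eq_maskSum (A : List Int) (m : Nat) :
    pvInnerTotal A (m : Int) = pvMaskSum A m := by
  unfold pvInnerTotal
  rw [PySem.List.pyRange_zero_nat, List.foldl_map]
  rw [PySem.List.foldl_congr_mem _ _
      (fun total k => total + (if m.testBit k then A.getD k 0 else 0)) 0 ?_]
  · rw [PySem.List.foldl_add, pvSum_testBit, zero_add]
  · intro acc k _
    simp only [PySem.List.pyGetD_natCast, Int.toNat_natCast, Int.shiftLeft_eq_mul_pow,
      one_mul, PySem.Int.band_natCast, Nat.and_two_pow]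
    by_cases hb : m.testBit k <;> simp [hb]

theorem pvRange_two_mul {α : Type} (n : Nat) (g : Nat → α) :
    (List.range (2 * n)).map g = (List.range n).flatMap (fun m => [g (2 * m), g (2 * m + 1)]) := by
  induction n with
  | zero => rfl
  | succ n ih =>
    have h2 : 2 * (n + 1) = (2 * n + 1) + 1 := by omega
    rw [h2, List.range_succ, List.range_succ, List.range_succ]
    simp [ih]

theorem pvMap_maskSum_eq_subsetSums (A : List Int) :
    (List.range (2 ^ A.length)).map (pvMaskSum A) = pvSubsetSums A := by
  induction A with
  | nil => rfl
  | cons x A ih =>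
    rw [List.length_cons, pow_succ, mul_comm, pvRange_two_mul, pvSubsetSums, ← ih,
      List.flatMap_map]
    apply List.flatMap_congr
    intro m _
    have e1 : pvMaskSum (x :: A) (2 * m) = pvMaskSum A m := by
      rw [pvMaskSum]; norm_num [Nat.mul_div_cancel_left]
    have e2 : pvMaskSum (x :: A) (2 * m + 1) = pvMaskSum A m + x := by
      rw [pvMaskSum]
      have h1 : (2 * m + 1) % 2 = 1 := by omega
      have h2 : (2 * m + 1) / 2 = m := by omega
      rw [h1, h2, if_pos rfl, add_comm]
    rw [e1, e2]

theorem pvCombinations_eq (A : List Int) (C : Int) :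
    pvCombinations A C = (pvSubsetSums A).filter (fun s => decide (s ≤ C)) := by
  unfold pvCombinations
  rw [show ((1 : Int) <<< ((A.length : Nat) : Int)) = (((2 ^ A.length : Nat) : Int)) by
    rw [Int.shiftLeft_eq_mul_pow, one_mul]]
  rw [PySem.List.pyRange_zero_nat]
  rw [PySem.List.foldl_append_ite (fun bit => pvInnerTotal A bit ≤ C) (pvInnerTotal A),
    List.nil_append]
  rw [← pvMap_maskSum_eq_subsetSums, List.filter_map, List.filter_map, List.map_map]
  rw [List.filter_congr (q := (fun s => decide (s ≤ C)) ∘ pvMaskSum A)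
    (by intro m _; simp [Function.comp, pvInnerTotal_eq_maskSum])]
  apply List.map_congr_left
  intro m hm
  simp [Function.comp, pvInnerTotal_eq_maskSum]

-- index/count characterisation in a sorted list
theorem pvSorted_getD (Q : List Int) (K : Int) (hs : Q.Pairwise (· ≤ ·))
    (i : Nat) (hi : i < Q.length) :
    Q.getD i 0 ≤ K ↔ i < Q.countP (fun q => decide (q ≤ K)) := by
  induction Q generalizing i with
  | nil => simp at hi
  | cons x t ih =>
    by_cases hx : x ≤ K
    · rw [List.countP_cons, if_pos (by simp [hx])]
      cases i with
      | zero => simp [hx]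
      | succ i =>
        rw [List.getD_cons_succ]
        rw [ih hs.tail i (by simpa using hi)]
        omega
    · have hall : List.countP (fun q => decide (q ≤ K)) (x :: t) = 0 := by
        rw [List.countP_eq_zero]
        intro q hq
        simp only [decide_eq_true_eq]
        rcases List.mem_cons.mp hq with h | h
        · simpa [h] using hx
        · have := List.rel_of_pairwise_cons hs h
          intro hqk; exact hx (le_trans this hqk)
      rw [hall]
      simp only [Nat.not_lt_zero, iff_false]
      rw [List.getD_eq_getElem _ _ hi]
      have hmem : (x :: t)[i] ∈ x :: t := List.getElem_mem hi
      rcases List.mem_cons.mp hmem with h | h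
      · rw [h]; exact hx
      · intro hk; exact hx (le_trans (List.rel_of_pairwise_cons hs h) hk)

theorem pvUbLoop_eq_countP (Q : List Int) (K : Int) (hs : Q.Pairwise (· ≤ ·)) :
    ∀ (n : Nat) (x y : Int), (y - x).toNat ≤ n → 0 ≤ x → y ≤ (Q.length : Int) →
    x ≤ (Q.countP (fun q => decide (q ≤ K)) : Int) →
    (Q.countP (fun q => decide (q ≤ K)) : Int) ≤ y →
    pvUbLoop Q K n x y = (Q.countP (fun q => decide (q ≤ K)) : Int) := by
  intro n
  induction n with
  | zero =>
    intro x y hn hx hy hxc hcy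
    rw [pvUbLoop]
    omega
  | succ n ih =>
    intro x y hn hx hy hxc hcy
    rw [pvUbLoop]
    by_cases hxy : x < y
    · rw [if_pos hxy]
      have hm : (x + y) >>> (1 : Nat) = (x + y) / 2 := by
        rw [Int.shiftRight_eq_div_pow]; norm_num
      set mid := (x + y) >>> (1 : Nat) with hmid
      have hb1 : x ≤ mid := by rw [hm]; omega
      have hb2 : mid < y := by rw [hm]; omega
      have hmidlen : mid.toNat < Q.length := by omega
      have hget : PySem.List.pyGetD Q mid 0 = Q.getD mid.toNat 0 :=
        PySem.List.pyGetD_of_nonneg Q 0 (by omega)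
      show (if PySem.List.pyGetD Q mid 0 > K then pvUbLoop Q K n x mid
            else pvUbLoop Q K n (mid + 1) y) = _
      rw [hget]
      have hchar := pvSorted_getD Q K hs mid.toNat hmidlen
      by_cases hgt : Q.getD mid.toNat 0 > K
      · rw [if_pos hgt]
        have : ¬ (mid.toNat < Q.countP (fun q => decide (q ≤ K))) := by
          intro h; exact absurd (hchar.mpr h) (by omega)
        exact ih x mid (by omega) hx (by omega) hxc (by omega)
      · rw [if_neg hgt]
        have : mid.toNat < Q.countP (fun q => decide (q ≤ K)) := hchar.mp (by omega)
        exact ih (mid + 1) y (by omega) (by omega) hy (by omega) hcy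
    · rw [if_neg hxy]; omega

theorem pvDropPtr_eq_countP (Q : List Int) (K : Int) (hs : Q.Pairwise (· ≤ ·)) :
    ∀ (j : Nat), j ≤ Q.length → Q.countP (fun q => decide (q ≤ K)) ≤ j →
    pvDropPtr Q K j = Q.countP (fun q => decide (q ≤ K)) := by
  intro j
  induction j with
  | zero => intro _ hc; rw [pvDropPtr]; omega
  | succ j ih =>
    intro hj hc
    rw [pvDropPtr]
    have hjlen : j < Q.length := by omega
    have hget : PySem.List.pyGetD Q (j : Int) 0 = Q.getD j 0 :=
      PySem.List.pyGetD_natCast Q j 0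
    rw [hget]
    have hchar := pvSorted_getD Q K hs j hjlen
    by_cases hgt : Q.getD j 0 > K
    · rw [if_pos hgt]
      have : ¬ (j < Q.countP (fun q => decide (q ≤ K))) := by
        intro h; exact absurd (hchar.mpr h) (by omega)
      exact ih (by omega) (by omega)
    · rw [if_neg hgt]
      have : j < Q.countP (fun q => decide (q ≤ K)) := hchar.mp (by omega)
      omega

theorem pvFold_two_pointer (Q : List Int) (C : Int) (hs : Q.Pairwise (· ≤ ·)) :
    ∀ (P : List Int), P.Pairwise (· ≤ ·) → ∀ (res : Int) (j : Nat), j ≤ Q.length →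
    (∀ p ∈ P, Q.countP (fun q => decide (q ≤ C - p)) ≤ j) →
    (P.foldl (fun st p =>
        (st.1 + (pvDropPtr Q (C - p) st.2 : Int), pvDropPtr Q (C - p) st.2)) (res, j)).1
      = res + (P.map (fun p => (Q.countP (fun q => decide (q ≤ C - p)) : Int))).sum := by
  intro P
  induction P with
  | nil => intro _ res j _ _; simp
  | cons p P ih =>
    intro hp res j hj hall
    rw [List.foldl_cons]
    have hdp : pvDropPtr Q (C - p) j = Q.countP (fun q => decide (q ≤ C - p)) :=
      pvDropPtr_eq_countP Q (C - p) hs j hj (hall p (List.mem_cons_self))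
    simp only [hdp]
    rw [ih hp.tail (res + _) _ List.countP_le_length ?_]
    · simp [add_assoc]
    · intro p' hp'
      have hpp' : p ≤ p' := List.rel_of_pairwise_cons hp hp'
      exact List.countP_mono_left (by intro q _ h; simp at h ⊢; omega)

-- ===== VERDICT (by name: the statement is the Claim_ definition above) =====
theorem solve_spec : Claim_equal_solve := by
  intro N C A _ _
  unfold Spec_solve
  by_cases h1 : N = 1
  · simp only [solve, solve_alt, if_pos h1]
  · simp only [solve, solve_alt, if_neg h1]
    rw [pvCombinations_eq, pvCombinations_eq]
    unfold pvHalfSums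
    set FT := (pvSubsetSums (PySem.List.slice A none (some (PySem.Int.floordiv N 2)))).filter
      (fun s => decide (s ≤ C)) with hFT
    set FU := (pvSubsetSums (PySem.List.slice A (some (PySem.Int.floordiv N 2)) none)).filter
      (fun s => decide (s ≤ C)) with hFU
    set Qs := PySem.List.sorted FU (fun q => q) false with hQs
    have hsQ : Qs.Pairwise (· ≤ ·) := by
      simpa using PySem.List.sorted_pairwise FU (fun q => q)
    have hsP : (PySem.List.sorted FT (fun s => s) false).Pairwise (· ≤ ·) := by
      simpa using PySem.List.sorted_pairwise FT (fun s => s)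
    rw [PySem.List.foldl_add]
    rw [pvFold_two_pointer Qs C hsQ (PySem.List.sorted FT (fun s => s) false) hsP 0 Qs.length
      (le_refl _) (fun p _ => List.countP_le_length)]
    rw [List.map_congr_left (g := fun amount => (Qs.countP (fun q => decide (q ≤ C - amount)) : Int))
      (by
        intro amount _
        exact pvUbLoop_eq_countP Qs (C - amount) hsQ Qs.length 0 (Qs.length : Int)
          (by omega) (by omega) (by omega)
          (by exact_mod_cast Int.natCast_nonneg _)
          (by exact_mod_cast List.countP_le_length))]
    have hperm : ((PySem.List.sorted FT (fun s => s) false).map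
        (fun p => (Qs.countP (fun q => decide (q ≤ C - p)) : Int))).Perm
        (FT.map (fun p => (Qs.countP (fun q => decide (q ≤ C - p)) : Int))) :=
      (PySem.List.sorted_perm FT (fun s => s) false).map _
    rw [hperm.sum_eq]
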